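-- pv_equiv track=rewrite | github.com/goldsr09/NBA-ML-Player-Prediction | scripts/grade_kalshi_snapshots.py | find_decision_snapshot
-- ===== SOURCE A (Python) =====
-- def find_decision_snapshot(game_snapshots):
--     """From a list of per-game snapshot dicts, find the best decision point.
--
--     Preference: end of Q3 (period=3, clock near 0) or earliest Q4 snapshot.
--     Returns the game snapshot dict, or None.
--     """
--     candidates = []
--     for gs in game_snapshots:
--         period = gs.get("period", 0)
--         clock = gs.get("clock_seconds")
--
--         # End of Q3: period=3, clock <= 30s (or None = between quarters)
--         if period == 3 and (clock is None or clock <= 30):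
--             candidates.append((0, gs))  # priority 0 = best
--         # Early Q4: period=4, clock > 600 (less than 2 min played)
--         elif period == 4 and clock is not None and clock > 600:
--             candidates.append((1, gs))
--
--     if not candidates:
--         return None
--
--     candidates.sort(key=lambda x: x[0])
--     return candidates[0][1]
-- ===== SOURCE B (Python) =====
-- def _end_of_q3(gs):
--     clock = gs.get("clock_seconds")
--     return gs.get("period", 0) == 3 and (clock is None or clock <= 30)
--
--
-- def _early_q4(gs):
--     clock = gs.get("clock_seconds")
--     return gs.get("period", 0) == 4 and clock is not None and clock > 600
--
--
-- def find_decision_snapshot(game_snapshots):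
--     """Two early-return scans: first end-of-Q3 snapshot, else first early-Q4 one."""
--     for gs in game_snapshots:
--         if _end_of_q3(gs):
--             return gs
--     for gs in game_snapshots:
--         if _early_q4(gs):
--             return gs
--     return None
-- ===== Notes on version B (the rewrite author's own statement) =====
-- stated objective: simpler
-- what changed: Replaces the build-a-priority-list-then-stable-sort pipeline with two plain scans that return the first end-of-Q3 snapshot, else the first early-Q4 snapshot, else None.
import Mathlib
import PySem

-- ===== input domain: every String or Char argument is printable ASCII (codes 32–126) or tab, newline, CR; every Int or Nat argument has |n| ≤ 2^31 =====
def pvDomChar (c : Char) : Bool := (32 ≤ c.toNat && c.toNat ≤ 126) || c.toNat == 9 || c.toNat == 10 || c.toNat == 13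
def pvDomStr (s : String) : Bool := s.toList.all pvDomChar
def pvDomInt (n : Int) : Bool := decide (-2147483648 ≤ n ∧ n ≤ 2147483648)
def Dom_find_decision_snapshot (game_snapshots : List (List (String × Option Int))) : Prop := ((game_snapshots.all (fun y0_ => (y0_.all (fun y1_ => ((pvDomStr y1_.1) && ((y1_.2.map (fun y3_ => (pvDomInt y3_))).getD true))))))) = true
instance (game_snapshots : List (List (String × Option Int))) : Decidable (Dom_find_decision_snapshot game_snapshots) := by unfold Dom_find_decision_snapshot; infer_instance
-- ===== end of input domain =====

-- B replaces A's candidate-list + stable-sort with two first-match scans (end-of-Q3, then early-Q4): simpler, same result.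


-- ===== PORT A =====
-- Literal port: build the (priority, snapshot) candidate list in input order,
-- stable-sort it by priority, return the head's snapshot (None if empty).
def find_decision_snapshot (game_snapshots : List (List (String × Option Int))) : Option (List (String × Option Int)) :=
  let candidates := game_snapshots.foldl (fun acc gs =>
    let period := (gs.lookup "period").getD (some 0)
    let clock := (gs.lookup "clock_seconds").getD none
    if period == some 3 && (match clock with | none => true | some c => c ≤ 30) then
      acc ++ [((0 : Int), gs)]
    else if period == some 4 && (match clock with | none => false | some c => 600 < c) then
      acc ++ [((1 : Int), gs)]
    else acc) []
  if candidates = [] then none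
  else
    match PySem.List.sorted candidates (fun x => x.1) false with
    | [] => none
    | c :: _ => some c.2

-- ===== PORT B =====
def isEndQ3 (gs : List (String × Option Int)) : Bool :=
  let clock := (gs.lookup "clock_seconds").getD none
  ((gs.lookup "period").getD (some 0) == some 3) &&
    (match clock with | none => true | some c => c ≤ 30)

def isEarlyQ4 (gs : List (String × Option Int)) : Bool :=
  let clock := (gs.lookup "clock_seconds").getD none
  ((gs.lookup "period").getD (some 0) == some 4) &&
    (match clock with | none => false | some c => 600 < c)

def find_decision_snapshot_alt (game_snapshots : List (List (String × Option Int))) : Option (List (String × Option Int)) :=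
  match game_snapshots.find? isEndQ3 with
  | some gs => some gs
  | none => game_snapshots.find? isEarlyQ4

-- ===== PRECONDITION & SPEC =====
def Spec_find_decision_snapshot (game_snapshots : List (List (String × Option Int))) (out : Option (List (String × Option Int))) : Prop := out = find_decision_snapshot_alt game_snapshots
instance (game_snapshots : List (List (String × Option Int))) (out : Option (List (String × Option Int))) : Decidable (Spec_find_decision_snapshot game_snapshots out) := by unfold Spec_find_decision_snapshot; infer_instance

-- ===== CLAIM (what is proved, stated in full; the proofs are below) =====
def Claim_equal_find_decision_snapshot : Prop := ∀ (game_snapshots : List (List (String × Option Int))), Dom_find_decision_snapshot game_snapshots → Spec_find_decision_snapshot game_snapshots (find_decision_snapshot game_snapshots)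

-- ===== LEMMAS AND PROOFS =====

-- A's loop body, with the let-bindings zeta-reduced (definitionally equal to the lambda in the port).
def pvStep (acc : List (Int × List (String × Option Int))) (gs : List (String × Option Int)) :
    List (Int × List (String × Option Int)) :=
  if isEndQ3 gs then acc ++ [((0 : Int), gs)]
  else if isEarlyQ4 gs then acc ++ [((1 : Int), gs)]
  else acc

-- The candidate list A's loop builds, written as a filterMap.
def pvCand (game_snapshots : List (List (String × Option Int))) : List (Int × List (String × Option Int)) :=
  game_snapshots.filterMap (fun gs =>
    if isEndQ3 gs then some ((0 : Int), gs)
    else if isEarlyQ4 gs then some ((1 : Int), gs)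
    else none)

lemma pvFoldl_eq_cand (gss : List (List (String × Option Int)))
    (acc : List (Int × List (String × Option Int))) :
    gss.foldl pvStep acc = acc ++ pvCand gss := by
  induction gss generalizing acc with
  | nil => simp [pvCand]
  | cons gs gss ih =>
    simp only [List.foldl_cons, pvCand, List.filterMap_cons, ih]
    by_cases h0 : isEndQ3 gs
    · simp [pvStep, h0]
    · by_cases h1 : isEarlyQ4 gs
      · simp [pvStep, h0, h1]
      · simp [pvStep, h0, h1]

-- Every candidate's priority is 0 or 1.
lemma pvCand_keys (gss : List (List (String × Option Int))) :
    ∀ c ∈ pvCand gss, c.1 = 0 ∨ c.1 = 1 := by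
  intro c hc
  simp only [pvCand, List.mem_filterMap] at hc
  obtain ⟨gs, -, h⟩ := hc
  by_cases h0 : isEndQ3 gs
  · simp [h0] at h; simp [← h]
  · by_cases h1 : isEarlyQ4 gs
    · simp [h0, h1] at h; simp [← h]
    · simp [h0, h1] at h

-- Inserting a priority-0 element into (zeros ++ ones) appends it to the zeros (stability).
lemma pvInsert0 (x : Int × List (String × Option Int)) (hx : x.1 = 0)
    (A B : List (Int × List (String × Option Int)))
    (hA : ∀ a ∈ A, a.1 = 0) (hB : ∀ b ∈ B, b.1 = 1) :
    PySem.List.insertBy (fun a b => decide (a.1 < b.1)) x (A ++ B) = A ++ x :: B := by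
  induction A with
  | nil =>
    cases B with
    | nil => simp [PySem.List.insertBy]
    | cons b bs =>
      have hb : b.1 = 1 := hB b (by simp)
      simp [PySem.List.insertBy, hx, hb]
  | cons a as ih =>
    have ha : a.1 = 0 := hA a (by simp)
    simp only [List.cons_append, PySem.List.insertBy, hx, ha]
    simp [ih (fun a' ha' => hA a' (by simp [ha']))]

-- Inserting a priority-1 element into (zeros ++ ones) appends it at the end (stability).
lemma pvInsert1 (x : Int × List (String × Option Int)) (hx : x.1 = 1)
    (A B : List (Int × List (String × Option Int)))
    (hA : ∀ a ∈ A, a.1 = 0) (hB : ∀ b ∈ B, b.1 = 1) :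
    PySem.List.insertBy (fun a b => decide (a.1 < b.1)) x (A ++ B) = (A ++ B) ++ [x] := by
  apply PySem.List.insertBy_of_forall_not_before
  intro y hy
  rcases List.mem_append.mp hy with h | h
  · have := hA y h; simp [hx, this]
  · have := hB y h; simp [hx, this]

-- The stable insertion sort on {0,1}-priorities: zeros in input order, then ones in input order.
lemma pvSortFold (cs : List (Int × List (String × Option Int)))
    (hcs : ∀ c ∈ cs, c.1 = 0 ∨ c.1 = 1)
    (A B : List (Int × List (String × Option Int)))
    (hA : ∀ a ∈ A, a.1 = 0) (hB : ∀ b ∈ B, b.1 = 1) :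
    cs.foldl (fun acc x => PySem.List.insertBy (fun a b => decide (a.1 < b.1)) x acc) (A ++ B)
      = (A ++ cs.filter (fun c => c.1 == 0)) ++ (B ++ cs.filter (fun c => c.1 == 1)) := by
  induction cs generalizing A B with
  | nil => simp
  | cons c cs ih =>
    rcases hcs c (by simp) with hc | hc
    · simp only [List.foldl_cons, pvInsert0 c hc A B hA hB]
      have hsplit : A ++ c :: B = (A ++ [c]) ++ B := by simp
      rw [hsplit, ih (fun x hx => hcs x (by simp [hx])) (A ++ [c]) B
        (by intro a ha; rcases List.mem_append.mp ha with h | h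
            · exact hA a h
            · simpa using List.mem_singleton.mp h ▸ hc) hB]
      simp [hc]
    · simp only [List.foldl_cons, pvInsert1 c hc A B hA hB]
      have hsplit : (A ++ B) ++ [c] = A ++ (B ++ [c]) := by simp
      rw [hsplit, ih (fun x hx => hcs x (by simp [hx])) A (B ++ [c]) hA
        (by intro b hb; rcases List.mem_append.mp hb with h | h
            · exact hB b h
            · simpa using List.mem_singleton.mp h ▸ hc)]
      simp [hc]

lemma pvSorted_cand (gss : List (List (String × Option Int))) :
    PySem.List.sorted (pvCand gss) (fun x => x.1) false
      = (pvCand gss).filter (fun c => c.1 == 0) ++ (pvCand gss).filter (fun c => c.1 == 1) := by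
  rw [PySem.List.sorted_eq_foldl_insertBy]
  simpa using pvSortFold (pvCand gss) (pvCand_keys gss) [] [] (by simp) (by simp)

lemma pvFilter0 (gss : List (List (String × Option Int))) :
    (pvCand gss).filter (fun c => c.1 == 0) = (gss.filter isEndQ3).map (fun g => ((0 : Int), g)) := by
  induction gss with
  | nil => rfl
  | cons gs gss ih =>
    simp only [pvCand, List.filterMap_cons, List.filter_cons]
    by_cases h0 : isEndQ3 gs
    · simp [h0, ← ih, pvCand]
    · by_cases h1 : isEarlyQ4 gs
      · simp [h0, h1, ← ih, pvCand]
      · simp [h0, h1, ← ih, pvCand]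

lemma pvFilter1 (gss : List (List (String × Option Int))) :
    (pvCand gss).filter (fun c => c.1 == 1) = (gss.filter isEarlyQ4).map (fun g => ((1 : Int), g)) := by
  induction gss with
  | nil => rfl
  | cons gs gss ih =>
    simp only [pvCand, List.filterMap_cons, List.filter_cons]
    by_cases h0 : isEndQ3 gs
    · have h1 : isEarlyQ4 gs = false := by
        by_contra h
        have h1t : isEarlyQ4 gs = true := by simpa using h
        have h0t := h0
        simp only [isEndQ3, isEarlyQ4, Bool.and_eq_true, beq_iff_eq] at h0t h1t
        rw [h0t.1] at h1t
        simpa using h1t.1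
      simp [h0, h1, ← ih, pvCand]
    · by_cases h1 : isEarlyQ4 gs
      · simp [h0, h1, ← ih, pvCand]
      · simp [h0, h1, ← ih, pvCand]

-- Python's first-match scan as head-of-filter.
lemma pvFind?_eq_head?_filter (p : List (String × Option Int) → Bool)
    (l : List (List (String × Option Int))) : l.find? p = (l.filter p).head? := by
  induction l with
  | nil => rfl
  | cons a l ih =>
    rw [List.find?_cons, List.filter_cons]
    cases h : p a
    · simpa using ih
    · simp

-- ===== VERDICT (by name: the statement is the Claim_ definition above) =====
theorem find_decision_snapshot_spec : Claim_equal_find_decision_snapshot := by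
  intro gss _
  unfold Spec_find_decision_snapshot find_decision_snapshot_alt
  have hA : find_decision_snapshot gss =
      (let candidates := gss.foldl pvStep []
       if candidates = [] then none
       else
         match PySem.List.sorted candidates (fun x => x.1) false with
         | [] => none
         | c :: _ => some c.2) := rfl
  rw [hA]
  simp only [pvFoldl_eq_cand gss [], List.nil_append]
  rw [pvSorted_cand gss, pvFilter0 gss, pvFilter1 gss,
    pvFind?_eq_head?_filter isEndQ3 gss, pvFind?_eq_head?_filter isEarlyQ4 gss]
  by_cases hE : pvCand gss = []
  · have h0 : gss.filter isEndQ3 = [] := by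
      have hcongr := congrArg (List.filter (fun c => c.1 == 0)) hE
      rw [pvFilter0 gss] at hcongr
      simpa using hcongr
    have h1 : gss.filter isEarlyQ4 = [] := by
      have hcongr := congrArg (List.filter (fun c => c.1 == 1)) hE
      rw [pvFilter1 gss] at hcongr
      simpa using hcongr
    simp [hE, h0, h1]
  · rw [if_neg hE]
    cases hq3 : gss.filter isEndQ3 with
    | nil =>
      cases hq4 : gss.filter isEarlyQ4 with
      | nil =>
        exfalso
        apply hE
        have hs := pvSorted_cand gss
        rw [pvFilter0 gss, pvFilter1 gss, hq3, hq4] at hs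
        simpa [PySem.List.sorted_eq_nil_iff] using hs
      | cons g rest => simp
    | cons g rest => simp
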